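-- pv_equiv track=rewrite | github.com/TheAakashSingh/automationmailsender | contact_extractor.py | get_best_contact_email
-- ===== SOURCE A (Python) =====
-- from typing import List, Dict, Set
--
-- def get_best_contact_email(contacts: Dict) -> str:
--     """Get the best/business email from contacts."""
--     emails = contacts.get('emails', [])
--
--     if not emails:
--         return ''
--
--     # Prefer business emails
--     preferred = ['info@', 'contact@', 'hello@', 'sales@', 'support@']
--
--     for pref in preferred:
--         for email in emails:
--             if email.lower().startswith(pref):
--                 return email
--
--     # Return first email
--     return emails[0] if emails else ''
-- ===== SOURCE B (Python) =====
-- def get_best_contact_email(contacts) -> str: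
--     """Get the best/business email from contacts (single pass, rank-based)."""
--     emails = contacts.get('emails', [])
--     prefixes = ['info@', 'contact@', 'hello@', 'sales@', 'support@']
--     best_rank = len(prefixes)
--     best_email = None
--     for email in emails:
--         low = email.lower()
--         rank = next((i for i, p in enumerate(prefixes) if low.startswith(p)), len(prefixes))
--         if rank < best_rank:
--             best_rank = rank
--             best_email = email
--     if best_email is not None:
--         return best_email
--     return emails[0] if emails else ''
-- ===== Notes on version B (the rewrite author's own statement) =====
-- stated objective: simpler
-- what changed: Replaces A's prefix-major nested loops (re-scanning the whole email list once per preferred prefix) with a single email-major pass that computes each email's prefix rank and keeps the first email of strictly smallest rank.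
import Mathlib
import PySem

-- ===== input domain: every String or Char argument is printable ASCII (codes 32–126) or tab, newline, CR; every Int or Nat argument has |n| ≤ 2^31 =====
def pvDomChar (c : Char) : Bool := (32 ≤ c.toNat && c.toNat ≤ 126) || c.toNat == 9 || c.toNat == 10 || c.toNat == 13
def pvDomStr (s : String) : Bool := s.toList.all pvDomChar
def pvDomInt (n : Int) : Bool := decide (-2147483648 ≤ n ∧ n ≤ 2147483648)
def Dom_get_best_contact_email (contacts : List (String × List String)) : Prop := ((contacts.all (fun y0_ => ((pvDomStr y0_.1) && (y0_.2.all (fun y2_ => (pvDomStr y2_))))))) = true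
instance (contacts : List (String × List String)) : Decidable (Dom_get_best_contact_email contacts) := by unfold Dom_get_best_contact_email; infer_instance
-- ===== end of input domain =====

-- B is a single email-major pass keeping the first email of strictly smallest prefix rank,
-- instead of A's prefix-major nested loops; equal return value on every input (objective: simpler).

-- ===== PORT A =====
-- the 'for pref in preferred: for email in emails:' nested loops, returning at the first hit
def pvPrefLoop (emails : List String) : List String → Option String
  | [] => none
  | p :: ps =>
    match emails.find? (fun e => PySem.Str.startswith (PySem.Str.lower e) p) with
    | some e => some e
    | none => pvPrefLoop emails ps

def get_best_contact_email (contacts : List (String × List String)) : String :=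
  let emails := (PySem.Dict.mk contacts).getD "emails" []   -- contacts.get('emails', [])
  if emails.isEmpty then ""
  else
    let preferred := ["info@", "contact@", "hello@", "sales@", "support@"]
    match pvPrefLoop emails preferred with
    | some e => e
    | none => if !emails.isEmpty then (PySem.List.pyGet? emails 0).getD "" else ""

-- ===== PORT B =====
-- rank of an email = index of the first preferred prefix it starts with, else 5 (= len(prefixes))
def pvRank (prefixes : List String) (e : String) : Nat :=
  (prefixes.findIdx? (fun p => PySem.Str.startswith (PySem.Str.lower e) p)).getD prefixes.length

def get_best_contact_email_alt (contacts : List (String × List String)) : String :=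
  let emails := (PySem.Dict.mk contacts).getD "emails" []   -- contacts.get('emails', [])
  let prefixes := ["info@", "contact@", "hello@", "sales@", "support@"]
  let best := emails.foldl
    (fun (st : Nat × Option String) e =>
      let r := pvRank prefixes e
      if r < st.1 then (r, some e) else st)
    (prefixes.length, none)
  match best.2 with
  | some e => e
  | none => if !emails.isEmpty then (PySem.List.pyGet? emails 0).getD "" else ""

-- ===== PRECONDITION & SPEC =====
def Spec_get_best_contact_email (contacts : List (String × List String)) (out : String) : Prop := out = get_best_contact_email_alt contacts
instance (contacts : List (String × List String)) (out : String) : Decidable (Spec_get_best_contact_email contacts out) := by unfold Spec_get_best_contact_email; infer_instance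

-- ===== CLAIM (what is proved, stated in full; the proofs are below) =====
def Claim_equal_get_best_contact_email : Prop := ∀ (contacts : List (String × List String)), Dom_get_best_contact_email contacts → Spec_get_best_contact_email contacts (get_best_contact_email contacts)

-- ===== LEMMAS AND PROOFS =====

-- "last selection" view of B's fold: sel l br = the final best_email set by the fold when it starts at rank br
def pvSel (ps : List String) : List String → Nat → Option String
  | [], _ => none
  | e :: t, br =>
    if pvRank ps e < br then
      match pvSel ps t (pvRank ps e) with
      | some e' => some e'
      | none => some e
    else pvSel ps t br

theorem pvFoldl_eq_sel (ps : List String) (l : List String) (br : Nat) (be : Option String) :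
    (l.foldl (fun (st : Nat × Option String) e =>
        let r := pvRank ps e
        if r < st.1 then (r, some e) else st) (br, be)).2 =
      match pvSel ps l br with
      | some e' => some e'
      | none => be := by
  induction l generalizing br be with
  | nil => simp [pvSel]
  | cons e t ih =>
    by_cases h : pvRank ps e < br
    · have hstep : ((e :: t).foldl (fun (st : Nat × Option String) e =>
          let r := pvRank ps e
          if r < st.1 then (r, some e) else st) (br, be)) =
          (t.foldl (fun (st : Nat × Option String) e =>
            let r := pvRank ps e
            if r < st.1 then (r, some e) else st) (pvRank ps e, some e)) := by
        simp [List.foldl, h]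
      rw [hstep, ih]
      simp only [pvSel, if_pos h]
      cases pvSel ps t (pvRank ps e) <;> rfl
    · have hstep : ((e :: t).foldl (fun (st : Nat × Option String) e =>
          let r := pvRank ps e
          if r < st.1 then (r, some e) else st) (br, be)) =
          (t.foldl (fun (st : Nat × Option String) e =>
            let r := pvRank ps e
            if r < st.1 then (r, some e) else st) (br, be)) := by
        simp [List.foldl, h]
      rw [hstep, ih]
      simp only [pvSel, if_neg h]

theorem pvSel_none (ps : List String) (l : List String) (br : Nat)
    (h : ∀ e ∈ l, ¬ pvRank ps e < br) : pvSel ps l br = none := by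
  induction l generalizing br with
  | nil => rfl
  | cons e t ih =>
    simp only [pvSel, if_neg (h e (by simp))]
    exact ih br (fun e' he' => h e' (by simp [he']))

-- shifting: if an email does not match the head prefix, its rank over p::ps is its rank over ps plus one
theorem pvRank_cons_of_no_match (p : String) (ps : List String) (e : String)
    (h : PySem.Str.startswith (PySem.Str.lower e) p = false) :
    pvRank (p :: ps) e = pvRank ps e + 1 := by
  simp only [pvRank, List.findIdx?_cons, h, List.length_cons]
  cases List.findIdx? (fun q => PySem.Str.startswith (PySem.Str.lower e) q) ps <;> simp [Option.map]

theorem pvSel_shift (p : String) (ps : List String) (l : List String) (br : Nat)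
    (h : ∀ e ∈ l, PySem.Str.startswith (PySem.Str.lower e) p = false) :
    pvSel (p :: ps) l (br + 1) = pvSel ps l br := by
  induction l generalizing br with
  | nil => rfl
  | cons e t ih =>
    have he : pvRank (p :: ps) e = pvRank ps e + 1 :=
      pvRank_cons_of_no_match p ps e (h e (by simp))
    have ht : ∀ e' ∈ t, PySem.Str.startswith (PySem.Str.lower e') p = false :=
      fun e' he' => h e' (by simp [he'])
    simp only [pvSel, he, Nat.add_lt_add_iff_right, ih _ ht]

-- once an email of rank 0 (a head-prefix match) exists, sel returns the FIRST such email
theorem pvSel_of_rank_zero (ps : List String) (e₀ : String) (l₂ : List String) :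
    ∀ (l₁ : List String) (br : Nat), 0 < br → (∀ e ∈ l₁, pvRank ps e ≠ 0) → pvRank ps e₀ = 0 →
      pvSel ps (l₁ ++ e₀ :: l₂) br = some e₀ := by
  intro l₁
  induction l₁ with
  | nil =>
    intro br hbr _ h₀
    simp only [List.nil_append, pvSel, h₀, if_pos hbr]
    rw [pvSel_none ps l₂ 0 (fun _ _ => by omega)]
  | cons a l₁' ih =>
    intro br hbr h₁ h₀
    have hane : pvRank ps a ≠ 0 := h₁ a (by simp)
    have h₁' : ∀ e' ∈ l₁', pvRank ps e' ≠ 0 := fun e' he' => h₁ e' (by simp [he'])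
    simp only [List.cons_append, pvSel]
    by_cases hc : pvRank ps a < br
    · rw [if_pos hc, ih (pvRank ps a) (by omega) h₁' h₀]
    · rw [if_neg hc]
      exact ih br hbr h₁' h₀

-- rank 0 over p::ps is exactly "startswith p"
theorem pvRank_zero_iff (p : String) (ps : List String) (e : String) :
    pvRank (p :: ps) e = 0 ↔ PySem.Str.startswith (PySem.Str.lower e) p = true := by
  constructor
  · intro h
    by_contra hn
    have hf : PySem.Str.startswith (PySem.Str.lower e) p = false := by
      cases hx : PySem.Str.startswith (PySem.Str.lower e) p
      · rfl
      · exact absurd hx hn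
    rw [pvRank_cons_of_no_match p ps e hf] at h
    omega
  · intro h
    simp only [pvRank, List.findIdx?_cons, h]
    rfl

-- the bridge: A's nested loops equal sel started at the full length
theorem pvPrefLoop_eq_sel (ps : List String) (l : List String) :
    pvPrefLoop l ps = pvSel ps l ps.length := by
  induction ps generalizing l with
  | nil =>
    simp only [List.length_nil]
    rw [pvSel_none [] l 0 (fun _ _ => by omega)]
    rfl
  | cons p ps' ih =>
    simp only [pvPrefLoop]
    cases hf : l.find? (fun e => PySem.Str.startswith (PySem.Str.lower e) p) with
    | none =>
      have hnone : ∀ e ∈ l, PySem.Str.startswith (PySem.Str.lower e) p = false := by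
        intro e he
        have := List.find?_eq_none.mp hf e he
        cases hx : PySem.Str.startswith (PySem.Str.lower e) p
        · rfl
        · exact absurd hx this
      rw [List.length_cons, pvSel_shift p ps' l ps'.length hnone, ih l]
    | some e₀ =>
      obtain ⟨hp, l₁, l₂, hl, hpre⟩ := List.find?_eq_some_iff_append.mp hf
      have h₀ : pvRank (p :: ps') e₀ = 0 := (pvRank_zero_iff p ps' e₀).mpr hp
      have h₁ : ∀ e ∈ l₁, pvRank (p :: ps') e ≠ 0 := by
        intro e he hz
        have hmatch := (pvRank_zero_iff p ps' e).mp hz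
        have hb := hpre e he
        rw [hmatch] at hb
        simp at hb
      rw [hl, pvSel_of_rank_zero (p :: ps') e₀ l₂ l₁ (p :: ps').length (by simp) h₁ h₀]

-- ===== VERDICT (by name: the statement is the Claim_ definition above) =====
theorem get_best_contact_email_spec : Claim_equal_get_best_contact_email := by
  intro contacts _
  unfold Spec_get_best_contact_email get_best_contact_email get_best_contact_email_alt
  set emails := (PySem.Dict.mk contacts).getD "emails" [] with hemails
  simp only
  rw [pvFoldl_eq_sel, ← pvPrefLoop_eq_sel]
  cases hE : emails with
  | nil => simp [pvPrefLoop]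
  | cons e t =>
    simp only [List.isEmpty_cons, Bool.false_eq_true, if_false]
    cases pvPrefLoop (e :: t) ["info@", "contact@", "hello@", "sales@", "support@"] <;> simp
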